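-- pv_equiv track=rewrite | github.com/kimSooHyun950921/algoritm | soohyun/python/baekjoon/0429/21608_상어초등학교/1.py | solution
-- ===== SOURCE A (Python) =====
-- DR = [-1, 1, 0, 0]
--
-- DC = [0, 0, -1, 1]
--
-- def make_maps(num):
--     maps = list()
--     for _ in range(num):
--         maps.append([0]*num)
--     return maps
--
-- def is_in_boundary(arow, acol, N):
--     if arow >= 0 and arow < N:
--         if acol >= 0 and acol < N:
--             return True
--     return False
--
-- def solution(seats, N, student_list):
--     # 친한친구가 가장 많은것 계산
--     maps = make_maps(N)
--
--     for stud in student_list: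
--         prefer_seat = list()
--         student = stud
--         prefer = seats[stud]
--         max_prefer_student = 0
--         for row in range(N):
--             for col in range(N):
--                 if maps[row][col] != 0:
--                     continue
--                 count_prefer_student = 0
--                 for dr, dc in zip(DR, DC):
--                     # 인접 학생 찾기
--                     arow = row + dr
--                     acol = col + dc
--                     if is_in_boundary(arow, acol, N):
--                         if prefer.get(maps[arow][acol], False):
--                             count_prefer_student += 1
--                 if max_prefer_student == count_prefer_student:
--                     prefer_seat.append((row, col))
--                 elif max_prefer_student < count_prefer_student:
--                     del prefer_seat
--                     prefer_seat = [(row, col)]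
--                     max_prefer_student = count_prefer_student
--
--
--         # 빈자리가 가장 많은것을 계산
--         zero_seat = list()
--         max_zero_seat = 0
--         for row, col in prefer_seat:
--             zero_count = 0
--             if maps[row][col] != 0:
--                     continue
--             for dr, dc in zip(DR, DC):
--                 # 빈자리 찾기
--                 arow = row + dr
--                 acol = col + dc
--                 if is_in_boundary(arow, acol, N) and maps[arow][acol] == 0:
--                     zero_count += 1
--             if max_zero_seat == zero_count:
--                 zero_seat.append((row, col))
--             elif max_zero_seat < zero_count:
--                 max_zero_seat = zero_count
--                 del zero_seat
--                 zero_seat = [(row, col)]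
--
--         # 작은자리 계산
--         row, col = zero_seat.pop(0)
--         # 자리 선정
--         maps[row][col] = stud
--
--     # 만족도 조사
--     satisfy = 0
--     for row in range(N):
--         for col in range(N):
--             student = maps[row][col]
--             prefer = seats[student]
--             count_prefer_student = 0
--             for dr, dc in zip(DR, DC):
--                 arow = row + dr
--                 acol = col + dc
--                 if is_in_boundary(arow, acol, N):
--                     if prefer.get(maps[arow][acol], False):
--                         count_prefer_student += 1
--             if count_prefer_student == 1:
--                 satisfy += 1
--             if count_prefer_student == 2:
--                 satisfy += 10
--             if count_prefer_student == 3: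
--                 satisfy += 100
--             if count_prefer_student == 4:
--                 satisfy += 1000
--     return satisfy
-- ===== SOURCE B (Python) =====
-- # B: single-pass seat selection by lexicographic min-by-key over a dict-based board,
-- # plus a table lookup for the satisfaction score (simpler decomposition, same cost).
--
-- _NBRS = ((-1, 0), (1, 0), (0, -1), (0, 1))
--
-- _SCORE = {1: 1, 2: 10, 3: 100, 4: 1000}
--
--
-- def solution(seats, N, student_list):
--     board = {}  # (row, col) -> student; a seat is empty while its value is 0 / absent
--
--     for stud in student_list:
--         prefer = seats[stud]
--         best = None
--         for row in range(N):
--             for col in range(N):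
--                 if board.get((row, col), 0) != 0:
--                     continue
--                 p = 0
--                 e = 0
--                 for dr, dc in _NBRS:
--                     ar, ac = row + dr, col + dc
--                     if 0 <= ar < N and 0 <= ac < N:
--                         if prefer.get(board.get((ar, ac), 0), False):
--                             p += 1
--                         if board.get((ar, ac), 0) == 0:
--                             e += 1
--                 key = (-p, -e, row, col)
--                 if best is None or key < best:
--                     best = key
--         _, _, row, col = best
--         board[(row, col)] = stud
--
--     satisfy = 0
--     for row in range(N):
--         for col in range(N):
--             prefer = seats[board.get((row, col), 0)]
--             p = 0
--             for dr, dc in _NBRS: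
--                 ar, ac = row + dr, col + dc
--                 if 0 <= ar < N and 0 <= ac < N:
--                     if prefer.get(board.get((ar, ac), 0), False):
--                         p += 1
--             satisfy += _SCORE.get(p, 0)
--     return satisfy
-- ===== Notes on version B (the rewrite author's own statement) =====
-- stated objective: simpler
-- what changed: B replaces A's two-phase candidate selection (build the max-preferred-neighbour list, then re-scan it for the max-empty-neighbour list, then pop the first) with a single pass over the empty seats of a dict-based board keeping the running minimum of the key (-prefer_count, -empty_count, row, col), and replaces the satisfaction if-chain with a score-table lookup.
import Mathlib
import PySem

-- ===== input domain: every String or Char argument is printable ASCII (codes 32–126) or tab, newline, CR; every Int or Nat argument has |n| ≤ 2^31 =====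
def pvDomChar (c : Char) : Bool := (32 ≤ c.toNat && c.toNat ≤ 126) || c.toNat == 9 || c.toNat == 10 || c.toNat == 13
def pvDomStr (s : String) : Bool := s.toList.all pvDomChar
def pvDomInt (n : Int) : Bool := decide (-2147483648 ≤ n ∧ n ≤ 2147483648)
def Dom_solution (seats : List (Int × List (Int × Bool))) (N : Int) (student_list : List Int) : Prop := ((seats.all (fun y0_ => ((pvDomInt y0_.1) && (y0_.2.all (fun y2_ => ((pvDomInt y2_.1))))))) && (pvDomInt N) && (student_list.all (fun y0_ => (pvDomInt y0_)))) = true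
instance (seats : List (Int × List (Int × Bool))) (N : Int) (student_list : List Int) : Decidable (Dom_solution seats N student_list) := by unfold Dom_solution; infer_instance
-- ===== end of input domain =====

-- B replaces A's two-phase candidate-list selection (max-prefer list, then max-empty list, then
-- pop the first) by a single lexicographic min-by-key pass over a dict-based board, and the
-- satisfaction if-chain by a score-table lookup (alternative decomposition, same cost).

-- ===== PORT A =====
def pvDR : List Int := [-1, 1, 0, 0]
def pvDC : List Int := [0, 0, -1, 1]

def make_maps (num : Int) : List (List Int) :=
  (PySem.List.pyRange 0 num 1).foldl (fun maps _ => maps ++ [PySem.List.pyRepeat [(0 : Int)] num]) []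

def is_in_boundary (arow acol N : Int) : Bool :=
  if arow ≥ 0 ∧ arow < N then (if acol ≥ 0 ∧ acol < N then true else false) else false

-- maps[r][c]: indices used by A always come from range(N) over an N×N grid, so the total pyGetD form is exact
def pvGGet (maps : List (List Int)) (r c : Int) : Int :=
  PySem.List.pyGetD (PySem.List.pyGetD maps r []) c 0

-- maps[row][col] = stud (indices in range for the same reason)
def pvSetCell (maps : List (List Int)) (r c v : Int) : List (List Int) :=
  PySem.List.pySetD maps r (PySem.List.pySetD (PySem.List.pyGetD maps r []) c v)

-- A's repeated inner loop 'for dr, dc in zip(DR, DC): … count_prefer_student += 1'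
def countPreferA (prefer : List (Int × Bool)) (maps : List (List Int)) (N row col : Int) : Int :=
  (pvDR.zip pvDC).foldl (fun cnt dd =>
    let arow := row + dd.1
    let acol := col + dd.2
    if is_in_boundary arow acol N then
      if PySem.Dict.getD (PySem.Dict.mk prefer) (pvGGet maps arow acol) false then cnt + 1 else cnt
    else cnt) 0

-- A's zero-neighbour inner loop
def countZeroA (maps : List (List Int)) (N row col : Int) : Int :=
  (pvDR.zip pvDC).foldl (fun z dd =>
    let arow := row + dd.1
    let acol := col + dd.2
    if is_in_boundary arow acol N && (pvGGet maps arow acol == 0) then z + 1 else z) 0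

-- one iteration of A's 'for stud in student_list' loop
def stepA (seats : List (Int × List (Int × Bool))) (N : Int) (maps : List (List Int)) (stud : Int) :
    List (List Int) :=
  let prefer := (PySem.Dict.get? (PySem.Dict.mk seats) stud).getD []   -- seats[stud]; KeyError excluded by Pre_
  let ps := (PySem.List.pyRange 0 N 1).foldl (fun s row =>
      (PySem.List.pyRange 0 N 1).foldl (fun s col =>
        if pvGGet maps row col ≠ 0 then s
        else
          let cnt := countPreferA prefer maps N row col
          if s.1 == cnt then (s.1, s.2 ++ [(row, col)])
          else if s.1 < cnt then (cnt, [(row, col)])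
          else s) s) ((0 : Int), ([] : List (Int × Int)))
  let zs := ps.2.foldl (fun s rc =>
      if pvGGet maps rc.1 rc.2 ≠ 0 then s
      else
        let zc := countZeroA maps N rc.1 rc.2
        if s.1 == zc then (s.1, s.2 ++ [rc])
        else if s.1 < zc then (zc, [rc])
        else s) ((0 : Int), ([] : List (Int × Int)))
  let rc := ((PySem.List.pop? zs.2 0).map (·.1)).getD (0, 0)   -- zero_seat.pop(0); IndexError excluded by Pre_
  pvSetCell maps rc.1 rc.2 stud

def solution (seats : List (Int × List (Int × Bool))) (N : Int) (student_list : List Int) : Int :=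
  let maps := student_list.foldl (stepA seats N) (make_maps N)
  (PySem.List.pyRange 0 N 1).foldl (fun satisfy row =>
    (PySem.List.pyRange 0 N 1).foldl (fun satisfy col =>
      let student := pvGGet maps row col
      let prefer := (PySem.Dict.get? (PySem.Dict.mk seats) student).getD []   -- seats[student]; KeyError excluded by Pre_
      let cnt := countPreferA prefer maps N row col
      let satisfy := if cnt == 1 then satisfy + 1 else satisfy
      let satisfy := if cnt == 2 then satisfy + 10 else satisfy
      let satisfy := if cnt == 3 then satisfy + 100 else satisfy
      if cnt == 4 then satisfy + 1000 else satisfy) satisfy) 0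

-- ===== PORT B =====
def pvNBRS : List (Int × Int) := [(-1, 0), (1, 0), (0, -1), (0, 1)]
def pvSCORE : List (Int × Int) := [(1, 1), (2, 10), (3, 100), (4, 1000)]

-- Python's tuple '<' on 4-tuples of ints written out lexicographically (Lean's Prod '<' is pointwise)
def pvKeyLt (a b : Int × Int × Int × Int) : Bool :=
  a.1 < b.1 || (a.1 == b.1 && (a.2.1 < b.2.1 || (a.2.1 == b.2.1 &&
    (a.2.2.1 < b.2.2.1 || (a.2.2.1 == b.2.2.1 && a.2.2.2 < b.2.2.2)))))

-- 'if best is None or key < best: best = key'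
def pvMinStep (best : Option (Int × Int × Int × Int)) (k : Int × Int × Int × Int) :
    Option (Int × Int × Int × Int) :=
  match best with
  | none => some k
  | some b => if pvKeyLt k b then some k else best

-- B's '(p, e)' accumulation over the four neighbours of an empty seat
def pvPE (prefer : List (Int × Bool)) (board : PySem.Dict (Int × Int) Int) (N row col : Int) :
    Int × Int :=
  pvNBRS.foldl (fun pe d =>
    let ar := row + d.1
    let ac := col + d.2
    if 0 ≤ ar ∧ ar < N ∧ 0 ≤ ac ∧ ac < N then
      let pe1 := if PySem.Dict.getD (PySem.Dict.mk prefer) (PySem.Dict.getD board (ar, ac) 0) false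
                 then (pe.1 + 1, pe.2) else pe
      if PySem.Dict.getD board (ar, ac) 0 == 0 then (pe1.1, pe1.2 + 1) else pe1
    else pe) ((0 : Int), (0 : Int))

-- B's neighbour count in the satisfaction scan
def countPreferB (prefer : List (Int × Bool)) (board : PySem.Dict (Int × Int) Int) (N row col : Int) :
    Int :=
  pvNBRS.foldl (fun p d =>
    let ar := row + d.1
    let ac := col + d.2
    if 0 ≤ ar ∧ ar < N ∧ 0 ≤ ac ∧ ac < N then
      if PySem.Dict.getD (PySem.Dict.mk prefer) (PySem.Dict.getD board (ar, ac) 0) false then p + 1 else p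
    else p) 0

-- one iteration of B's placement loop
def stepB (seats : List (Int × List (Int × Bool))) (N : Int) (board : PySem.Dict (Int × Int) Int)
    (stud : Int) : PySem.Dict (Int × Int) Int :=
  let prefer := (PySem.Dict.get? (PySem.Dict.mk seats) stud).getD []   -- seats[stud]; KeyError excluded by Pre_
  let best := (PySem.List.pyRange 0 N 1).foldl (fun best row =>
      (PySem.List.pyRange 0 N 1).foldl (fun best col =>
        if PySem.Dict.getD board (row, col) 0 ≠ 0 then best
        else
          let pe := pvPE prefer board N row col
          pvMinStep best (-pe.1, -pe.2, row, col)) best)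
    (none : Option (Int × Int × Int × Int))
  match best with
  | none => board   -- Python would raise unpacking None; excluded by Pre_
  | some k => PySem.Dict.insert board (k.2.2.1, k.2.2.2) stud

def solution_alt (seats : List (Int × List (Int × Bool))) (N : Int) (student_list : List Int) : Int :=
  let board := student_list.foldl (stepB seats N) PySem.Dict.empty
  (PySem.List.pyRange 0 N 1).foldl (fun satisfy row =>
    (PySem.List.pyRange 0 N 1).foldl (fun satisfy col =>
      let prefer := (PySem.Dict.get? (PySem.Dict.mk seats) (PySem.Dict.getD board (row, col) 0)).getD []
      let p := countPreferB prefer board N row col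
      satisfy + PySem.Dict.getD (PySem.Dict.mk pvSCORE) p 0) satisfy) 0

-- ===== PRECONDITION & SPEC =====
-- Pre_ excludes exactly the inputs on which A raises: a student id not a key of seats (KeyError),
-- running out of empty seats before some iteration (IndexError on zero_seat.pop(0); a student id
-- 0 leaves its seat counted as empty, so only the nonzero ids of the first len-1 students fill
-- seats), and a final scan meeting an empty seat when 0 is not a key of seats (KeyError).
def Pre_solution (seats : List (Int × List (Int × Bool))) (N : Int) (student_list : List Int) : Prop :=
  (∀ s ∈ student_list, (PySem.Dict.get? (PySem.Dict.mk seats) s).isSome = true) ∧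
  (student_list ≠ [] → student_list.dropLast.countP (fun s => s != 0) < N.toNat * N.toNat) ∧
  (0 < N → student_list.countP (fun s => s != 0) < N.toNat * N.toNat →
    (PySem.Dict.get? (PySem.Dict.mk seats) 0).isSome = true)
instance (seats : List (Int × List (Int × Bool))) (N : Int) (student_list : List Int) :
    Decidable (Pre_solution seats N student_list) := by unfold Pre_solution; infer_instance

def pvWitness_solution : (List (Int × List (Int × Bool))) × Int × List Int :=
  ([(0, []), (1, [(2, true)]), (2, [(1, true)])], 2, [1, 2])

def Spec_solution (seats : List (Int × List (Int × Bool))) (N : Int) (student_list : List Int)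
    (out : Int) : Prop := out = solution_alt seats N student_list
instance (seats : List (Int × List (Int × Bool))) (N : Int) (student_list : List Int) (out : Int) :
    Decidable (Spec_solution seats N student_list out) := by unfold Spec_solution; infer_instance

-- ===== CLAIM (what is proved, stated in full; the proofs are below) =====
def Claim_equal_solution : Prop := ∀ (seats : List (Int × List (Int × Bool))) (N : Int) (student_list : List Int), Dom_solution seats N student_list → Pre_solution seats N student_list → Spec_solution seats N student_list (solution seats N student_list)

-- ===== LEMMAS AND PROOFS =====

-- row-major list of all board cells
def pvCells (N : Int) : List (Int × Int) :=
  (PySem.List.pyRange 0 N 1).flatMap (fun r => (PySem.List.pyRange 0 N 1).map (fun c => (r, c)))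

-- strict row-major order on cells
def pvRcLt (a b : Int × Int) : Prop := a.1 < b.1 ∨ (a.1 = b.1 ∧ a.2 < b.2)

theorem pv_foldl_flatMap {α β σ : Type} (f : α → List β) (g : σ → β → σ) :
    ∀ (l : List α) (init : σ),
    (l.flatMap f).foldl g init = l.foldl (fun s x => (f x).foldl g s) init := by
  intro l
  induction l with
  | nil => intro init; rfl
  | cons x t ih => intro init; simp [List.flatMap_cons, List.foldl_append, ih]

theorem pv_nested_foldl {σ : Type} (N : Int) (g : σ → (Int × Int) → σ) (init : σ) :
    (PySem.List.pyRange 0 N 1).foldl (fun s r =>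
      (PySem.List.pyRange 0 N 1).foldl (fun s c => g s (r, c)) s) init
      = (pvCells N).foldl g init := by
  rw [pvCells, pv_foldl_flatMap]
  symm
  apply PySem.List.foldl_congr_mem
  intro s r _
  exact List.foldl_map

theorem pv_mem_cells {N : Int} {x : Int × Int} :
    x ∈ pvCells N ↔ 0 ≤ x.1 ∧ x.1 < N ∧ 0 ≤ x.2 ∧ x.2 < N := by
  obtain ⟨a, b⟩ := x
  simp only [pvCells, List.mem_flatMap, List.mem_map, PySem.List.mem_pyRange_one, Prod.mk.injEq]
  constructor
  · rintro ⟨r, hr, c, hc, rfl, rfl⟩; exact ⟨hr.1, hr.2, hc.1, hc.2⟩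
  · rintro ⟨h1, h2, h3, h4⟩; exact ⟨a, ⟨h1, h2⟩, b, ⟨h3, h4⟩, rfl, rfl⟩

theorem pv_pairwise_flat (rs cs : List Int) (hr : rs.Pairwise (· < ·)) (hc : cs.Pairwise (· < ·)) :
    (rs.flatMap (fun r => cs.map (fun c => (r, c)))).Pairwise pvRcLt := by
  induction rs with
  | nil => simp
  | cons r t ih =>
      rw [List.pairwise_cons] at hr
      simp only [List.flatMap_cons, List.pairwise_append]
      refine ⟨(List.pairwise_map).2 (hc.imp (fun h => Or.inr ⟨rfl, h⟩)), ih hr.2, ?_⟩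
      rintro u hu v hv
      rcases List.mem_map.1 hu with ⟨c, _, rfl⟩
      rcases List.mem_flatMap.1 hv with ⟨r', hr', hv'⟩
      rcases List.mem_map.1 hv' with ⟨c', _, rfl⟩
      exact Or.inl (hr.1 r' hr')

theorem pv_pairwise_cells (N : Int) : (pvCells N).Pairwise pvRcLt :=
  pv_pairwise_flat _ _ (PySem.List.pairwise_lt_pyRange_one 0 N) (PySem.List.pairwise_lt_pyRange_one 0 N)

theorem pv_nodup_cells (N : Int) : (pvCells N).Nodup := by
  refine (pv_pairwise_cells N).imp ?_
  rintro ⟨a1, a2⟩ ⟨b1, b2⟩ h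
  rcases h with h | ⟨h1, h2⟩ <;> simp_all <;> omega

theorem pv_length_cells (N : Int) : (pvCells N).length = N.toNat * N.toNat := by
  simp [pvCells, List.length_flatMap, PySem.List.length_pyRange_one]

def pvGrid (N : Int) (maps : List (List Int)) : Prop :=
  maps.length = N.toNat ∧ ∀ row ∈ maps, row.length = N.toNat

theorem pv_make_maps_eq (N : Int) :
    make_maps N = List.replicate N.toNat (List.replicate N.toNat 0) := by
  rw [make_maps, PySem.List.foldl_append_singleton_eq_map (f := fun _ => PySem.List.pyRepeat [(0 : Int)] N)]
  simp [List.map_const', PySem.List.length_pyRange_one, PySem.List.pyRepeat_singleton]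

theorem pv_grid_make (N : Int) : pvGrid N (make_maps N) := by
  rw [pv_make_maps_eq]
  constructor
  · simp
  · intro row hrow; simp [List.eq_of_mem_replicate hrow]

theorem pv_row_toNat {N : Int} {maps : List (List Int)} (hg : pvGrid N maps) {r : Int}
    (h0 : 0 ≤ r) (hN : r < N) : r.toNat < maps.length := by
  rw [hg.1]; omega

theorem pv_pyGetD_row {N : Int} {maps : List (List Int)} (hg : pvGrid N maps) {r : Int}
    (h0 : 0 ≤ r) (hN : r < N) :
    PySem.List.pyGetD maps r [] = maps[r.toNat]'(pv_row_toNat hg h0 hN) := by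
  rw [PySem.List.pyGetD_eq_getElem maps [] h0 (by rw [hg.1]; omega)]

theorem pv_gget_make {N r c : Int} (h0 : 0 ≤ r) (hN : r < N) (h0' : 0 ≤ c) (hN' : c < N) :
    pvGGet (make_maps N) r c = 0 := by
  have hg := pv_grid_make N
  rw [pvGGet, pv_pyGetD_row hg h0 hN]
  rw [PySem.List.pyGetD_eq_getElem _ 0 h0' (by
    have := hg.2 _ (List.getElem_mem (pv_row_toNat hg h0 hN)); rw [this]; omega)]
  simp [pv_make_maps_eq]

theorem pv_grid_set {N : Int} {maps : List (List Int)} (hg : pvGrid N maps) {r c : Int} (v : Int)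
    (hr0 : 0 ≤ r) (hrN : r < N) (hc0 : 0 ≤ c) : pvGrid N (pvSetCell maps r c v) := by
  rw [pvSetCell, PySem.List.pySetD_of_nonneg _ _ hr0]
  constructor
  · simp [hg.1]
  · intro row hrow
    rcases List.mem_or_eq_of_mem_set hrow with h | h
    · exact hg.2 _ h
    · subst h
      rw [PySem.List.pySetD_of_nonneg _ _ hc0, List.length_set, pv_pyGetD_row hg hr0 hrN]
      exact hg.2 _ (List.getElem_mem (pv_row_toNat hg hr0 hrN))

theorem pv_gget_set {N : Int} {maps : List (List Int)} (hg : pvGrid N maps) {r c : Int} (v : Int)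
    (hr0 : 0 ≤ r) (hrN : r < N) (hc0 : 0 ≤ c) (hcN : c < N) {a b : Int}
    (ha0 : 0 ≤ a) (haN : a < N) (hb0 : 0 ≤ b) (hbN : b < N) :
    pvGGet (pvSetCell maps r c v) a b = if a = r ∧ b = c then v else pvGGet maps a b := by
  have hrow := pv_row_toNat hg hr0 hrN
  have hrlen : maps[r.toNat].length = N.toNat := hg.2 _ (List.getElem_mem hrow)
  have halen : (maps[a.toNat]'(pv_row_toNat hg ha0 haN)).length = N.toNat :=
    hg.2 _ (List.getElem_mem (pv_row_toNat hg ha0 haN))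
  rw [pvSetCell, PySem.List.pySetD_of_nonneg _ _ hr0, PySem.List.pySetD_of_nonneg _ _ hc0,
    pv_pyGetD_row hg hr0 hrN, pvGGet]
  rw [PySem.List.pyGetD_eq_getElem _ [] ha0 (by simp [hg.1]; omega)]
  rw [List.getElem_set]
  by_cases haR : a = r
  · subst haR
    rw [if_pos rfl]
    rw [PySem.List.pyGetD_eq_getElem _ 0 hb0 (by simp [hrlen]; omega)]
    rw [List.getElem_set]
    by_cases hbC : b = c
    · subst hbC
      rw [if_pos rfl, if_pos ⟨rfl, rfl⟩]
    · rw [if_neg (by omega), if_neg (by tauto)]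
      rw [pvGGet, pv_pyGetD_row hg ha0 haN,
        PySem.List.pyGetD_eq_getElem _ 0 hb0 (by simp [halen]; omega)]
  · rw [if_neg (by omega), if_neg (by tauto)]
    rw [pvGGet, pv_pyGetD_row hg ha0 haN,
      PySem.List.pyGetD_eq_getElem _ 0 hb0 (by simp [halen]; omega)]

-- ----- A's running-max candidate-list fold, characterised -----

def pvSelStep {α : Type} (f : α → Int) (s : Int × List α) (x : α) : Int × List α :=
  if s.1 == f x then (s.1, s.2 ++ [x]) else if s.1 < f x then (f x, [x]) else s

def pvMaxF {α : Type} (f : α → Int) (l : List α) (m : Int) : Int :=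
  l.foldl (fun a x => max a (f x)) m

theorem pv_sel_go {α : Type} (f : α → Int) :
    ∀ (l : List α) (m : Int) (acc : List α),
    l.foldl (pvSelStep f) (m, acc)
      = (pvMaxF f l m,
         (if pvMaxF f l m = m then acc else [])
           ++ l.filter (fun x => f x == pvMaxF f l m)) := by
  intro l
  induction l with
  | nil => intro m acc; simp [pvMaxF]
  | cons x t ih =>
      intro m acc
      have hMF : pvMaxF f (x :: t) m = pvMaxF f t (max m (f x)) := rfl
      rw [List.foldl_cons]
      rcases lt_trichotomy m (f x) with h | h | h
      · -- m < f x: reset branch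
        have hmx : max m (f x) = f x := by omega
        have hstep : pvSelStep f (m, acc) x = (f x, [x]) := by
          rw [pvSelStep, if_neg (by simp; omega), if_pos (show m < f x from h)]
        have hle : f x ≤ pvMaxF f t (f x) := by
          have := (PySem.List.le_foldl_max_int t f (f x)).1; exact this
        rw [hstep, ih, hMF, hmx]
        have hMne : ¬ (pvMaxF f t (f x) = m) := by omega
        rw [if_neg hMne, List.filter_cons]
        by_cases hM : pvMaxF f t (f x) = f x
        · rw [if_pos hM]
          have hb : (f x == pvMaxF f t (f x)) = true := by simp [hM]
          rw [hb]
          simp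
        · rw [if_neg hM]
          have hb : (f x == pvMaxF f t (f x)) = false := by
            simp; omega
          rw [hb]
          simp
      · -- m = f x: append branch
        have hmx : max m (f x) = m := by omega
        have hstep : pvSelStep f (m, acc) x = (m, acc ++ [x]) := by
          rw [pvSelStep, if_pos (by simp [h])]
        have hle : m ≤ pvMaxF f t m := by
          have := (PySem.List.le_foldl_max_int t f m).1; exact this
        rw [hstep, ih, hMF, hmx, List.filter_cons]
        by_cases hM : pvMaxF f t m = m
        · rw [if_pos hM, if_pos hM]
          have hb : (f x == pvMaxF f t m) = true := by simp [hM]; omega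
          rw [hb]
          simp
        · rw [if_neg hM, if_neg hM]
          have hb : (f x == pvMaxF f t m) = false := by simp; omega
          rw [hb]
          simp
      · -- f x < m: skip branch
        have hmx : max m (f x) = m := by omega
        have hstep : pvSelStep f (m, acc) x = (m, acc) := by
          rw [pvSelStep, if_neg (by simp; omega), if_neg (show ¬ m < f x by omega)]
        have hle : m ≤ pvMaxF f t m := by
          have := (PySem.List.le_foldl_max_int t f m).1; exact this
        rw [hstep, ih, hMF, hmx, List.filter_cons]
        have hb : (f x == pvMaxF f t m) = false := by simp; omega
        rw [hb]
        simp

theorem pv_max_attained {α : Type} (f : α → Int) (l : List α) (hne : l ≠ [])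
    (hnn : ∀ x ∈ l, 0 ≤ f x) : ∃ x ∈ l, f x = pvMaxF f l 0 := by
  have hmem := PySem.List.foldl_max_mem (l.map f) 0
  rw [List.foldl_map] at hmem
  rcases hmem with h | h
  · cases l with
    | nil => exact absurd rfl hne
    | cons y t =>
        refine ⟨y, List.mem_cons_self, ?_⟩
        have h1 := (PySem.List.le_foldl_max_int (y :: t) f 0).2 y List.mem_cons_self
        have h2 := hnn y List.mem_cons_self
        rw [pvMaxF]
        omega
  · rcases List.mem_map.1 h with ⟨x, hx, hfx⟩
    exact ⟨x, hx, hfx⟩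

-- ----- B's running lexicographic minimum, characterised -----

theorem pv_keyLt_asymm {a b : Int × Int × Int × Int} (h : pvKeyLt a b = true) :
    pvKeyLt b a = false := by
  obtain ⟨a1, a2, a3, a4⟩ := a; obtain ⟨b1, b2, b3, b4⟩ := b
  simp [pvKeyLt] at h ⊢
  omega

theorem pv_keyLt_trans {a b c : Int × Int × Int × Int} (h1 : pvKeyLt a b = true)
    (h2 : pvKeyLt b c = true) : pvKeyLt a c = true := by
  obtain ⟨a1, a2, a3, a4⟩ := a; obtain ⟨b1, b2, b3, b4⟩ := b; obtain ⟨c1, c2, c3, c4⟩ := c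
  simp [pvKeyLt] at h1 h2 ⊢
  omega

theorem pv_keyLt_total {a b : Int × Int × Int × Int} (hne : a ≠ b) :
    pvKeyLt a b = true ∨ pvKeyLt b a = true := by
  obtain ⟨a1, a2, a3, a4⟩ := a; obtain ⟨b1, b2, b3, b4⟩ := b
  simp [Prod.mk.injEq] at hne
  simp [pvKeyLt]
  omega


theorem pv_keyLt_irrefl (a : Int × Int × Int × Int) : pvKeyLt a a = false := by
  obtain ⟨a1, a2, a3, a4⟩ := a
  simp [pvKeyLt]

theorem pv_runmin_go :
    ∀ (l : List (Int × Int × Int × Int)) (b : Int × Int × Int × Int),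
    ∃ c, l.foldl pvMinStep (some b) = some c ∧ (c = b ∨ c ∈ l) ∧
      (∀ y ∈ l, pvKeyLt y c = false) ∧ pvKeyLt b c = false := by
  intro l
  induction l with
  | nil =>
      intro b
      exact ⟨b, rfl, Or.inl rfl, by simp, pv_keyLt_irrefl b⟩
  | cons x t ih =>
      intro b
      rw [List.foldl_cons]
      by_cases hx : pvKeyLt x b = true
      · have hstep : pvMinStep (some b) x = some x := by
          simp only [pvMinStep]; rw [if_pos hx]
        rw [hstep]
        rcases ih x with ⟨c, hc, hmem, hall, hxc⟩
        refine ⟨c, hc, ?_, ?_, ?_⟩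
        · rcases hmem with rfl | hm
          · exact Or.inr List.mem_cons_self
          · exact Or.inr (List.mem_cons_of_mem _ hm)
        · intro y hy
          rcases List.mem_cons.1 hy with rfl | hm
          · exact hxc
          · exact hall y hm
        · by_cases hbc : b = c
          · subst hbc; exact pv_keyLt_irrefl b
          · rcases pv_keyLt_total hbc with hb | hb
            · exfalso
              have := pv_keyLt_trans hx hb
              rw [hxc] at this
              simp at this
            · exact pv_keyLt_asymm hb
      · have hstep : pvMinStep (some b) x = some b := by
          simp only [pvMinStep]; rw [if_neg hx]
        rw [hstep]
        rcases ih b with ⟨c, hc, hmem, hall, hbc⟩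
        refine ⟨c, hc, ?_, ?_, hbc⟩
        · rcases hmem with rfl | hm
          · exact Or.inl rfl
          · exact Or.inr (List.mem_cons_of_mem _ hm)
        intro y hy
        rcases List.mem_cons.1 hy with rfl | hm
        · -- ¬ x < b and ¬ b < c imply ¬ x < c
          by_cases hyc : pvKeyLt y c = true
          · exfalso
            by_cases hcb : c = b
            · subst hcb; exact hx hyc
            · rcases pv_keyLt_total hcb with h1 | h1
              · exact hx (pv_keyLt_trans hyc h1)
              · rw [hbc] at h1; simp at h1
          · simpa using hyc
        · exact hall y hm

-- ----- the four-neighbour counts agree between the two board representations -----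

theorem pv_bound_eq (a b N : Int) :
    is_in_boundary a b N = decide (0 ≤ a ∧ a < N ∧ 0 ≤ b ∧ b < N) := by
  rw [is_in_boundary]
  by_cases h1 : a ≥ 0 ∧ a < N
  · by_cases h2 : b ≥ 0 ∧ b < N
    · rw [if_pos h1, if_pos h2]
      exact (decide_eq_true (by omega)).symm
    · rw [if_pos h1, if_neg h2]
      exact (decide_eq_false (by omega)).symm
  · rw [if_neg h1]
    exact (decide_eq_false (by omega)).symm

theorem pv_fold_pair {α β γ : Type} (F : β × γ → α → β × γ) (f : β → α → β) (g : γ → α → γ)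
    (h : ∀ s x, F s x = (f s.1 x, g s.2 x)) :
    ∀ (l : List α) (a : β) (b : γ), l.foldl F (a, b) = (l.foldl f a, l.foldl g b) := by
  intro l
  induction l with
  | nil => intro a b; rfl
  | cons x t ih => intro a b; rw [List.foldl_cons, h, List.foldl_cons, List.foldl_cons]; exact ih _ _

theorem pv_pe_step (prefer : List (Int × Bool)) (maps : List (List Int))
    (board : PySem.Dict (Int × Int) Int) (N r c : Int)
    (Hocc : ∀ a b, 0 ≤ a → a < N → 0 ≤ b → b < N →
      PySem.Dict.getD board (a, b) 0 = pvGGet maps a b)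
    (d : Int × Int) (pe : Int × Int) :
    (if 0 ≤ r + d.1 ∧ r + d.1 < N ∧ 0 ≤ c + d.2 ∧ c + d.2 < N then
       (fun pe1 => if PySem.Dict.getD board (r + d.1, c + d.2) 0 == 0 then (pe1.1, pe1.2 + 1) else pe1)
         (if PySem.Dict.getD (PySem.Dict.mk prefer) (PySem.Dict.getD board (r + d.1, c + d.2) 0) false
          then (pe.1 + 1, pe.2) else pe)
     else pe)
    = (if is_in_boundary (r + d.1) (c + d.2) N then
         (if PySem.Dict.getD (PySem.Dict.mk prefer) (pvGGet maps (r + d.1) (c + d.2)) false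
          then pe.1 + 1 else pe.1)
       else pe.1,
       if is_in_boundary (r + d.1) (c + d.2) N && (pvGGet maps (r + d.1) (c + d.2) == 0)
       then pe.2 + 1 else pe.2) := by
  rw [pv_bound_eq]
  by_cases hC : 0 ≤ r + d.1 ∧ r + d.1 < N ∧ 0 ≤ c + d.2 ∧ c + d.2 < N
  · have hd : decide (0 ≤ r + d.1 ∧ r + d.1 < N ∧ 0 ≤ c + d.2 ∧ c + d.2 < N) = true :=
      decide_eq_true hC
    rw [if_pos hC, hd, Hocc _ _ hC.1 hC.2.1 hC.2.2.1 hC.2.2.2]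
    by_cases hz : pvGGet maps (r + d.1) (c + d.2) = 0 <;>
      by_cases hL : PySem.Dict.getD (PySem.Dict.mk prefer) (pvGGet maps (r + d.1) (c + d.2)) false
        = true <;>
      (simp [hz, hL]; try (constructor <;> split_ifs <;> rfl))
  · have hd : decide (0 ≤ r + d.1 ∧ r + d.1 < N ∧ 0 ≤ c + d.2 ∧ c + d.2 < N) = false :=
      decide_eq_false hC
    rw [if_neg hC, hd]
    simp

theorem pv_pe_eq (prefer : List (Int × Bool)) (maps : List (List Int))
    (board : PySem.Dict (Int × Int) Int) (N : Int)
    (Hocc : ∀ a b, 0 ≤ a → a < N → 0 ≤ b → b < N →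
      PySem.Dict.getD board (a, b) 0 = pvGGet maps a b)
    (r c : Int) :
    pvPE prefer board N r c = (countPreferA prefer maps N r c, countZeroA maps N r c) := by
  have hzip : pvDR.zip pvDC = pvNBRS := rfl
  rw [pvPE, countPreferA, countZeroA, hzip]
  exact pv_fold_pair _ _ _ (fun pe d => pv_pe_step prefer maps board N r c Hocc d pe) _ 0 0

-- ----- the per-student invariant between A's grid and B's board dict -----

def pvInv (N : Int) (maps : List (List Int)) (board : PySem.Dict (Int × Int) Int) (i : Nat) :
    Prop :=
  pvGrid N maps ∧
  (∀ a b, 0 ≤ a → a < N → 0 ≤ b → b < N →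
    PySem.Dict.getD board (a, b) 0 = pvGGet maps a b) ∧
  ((pvCells N).filter (fun x => pvGGet maps x.1 x.2 == 0)).length + i = (pvCells N).length

theorem pv_inv_init (N : Int) : pvInv N (make_maps N) PySem.Dict.empty 0 := by
  refine ⟨pv_grid_make N, ?_, ?_⟩
  · intro a b h1 h2 h3 h4
    rw [pv_gget_make h1 h2 h3 h4]
    simp [PySem.Dict.getD_empty]
  · have : ((pvCells N).filter (fun x => pvGGet (make_maps N) x.1 x.2 == 0)) = pvCells N := by
      refine List.filter_eq_self.2 (fun x hx => ?_)
      rcases pv_mem_cells.1 hx with ⟨h1, h2, h3, h4⟩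
      simp [pv_gget_make h1 h2 h3 h4]
    rw [this]
    simp

theorem pv_nested_foldl2 {σ : Type} (N : Int) (g : σ → Int → Int → σ) (init : σ) :
    (PySem.List.pyRange 0 N 1).foldl (fun s r =>
      (PySem.List.pyRange 0 N 1).foldl (fun s c => g s r c) s) init
      = (pvCells N).foldl (fun s x => g s x.1 x.2) init :=
  pv_nested_foldl N (fun s x => g s x.1 x.2) init

theorem pv_dec0 (x : Int) : (decide ¬ (x ≠ 0)) = (x == 0) := by
  by_cases h : x = 0 <;> simp [h]

theorem pv_guard_fold {σ : Type} (N : Int) (maps : List (List Int)) (F : σ → (Int × Int) → σ)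
    (init : σ) :
    (pvCells N).foldl (fun s x => if pvGGet maps x.1 x.2 ≠ 0 then s else F s x) init
      = ((pvCells N).filter (fun x => pvGGet maps x.1 x.2 == 0)).foldl F init := by
  refine Eq.trans (PySem.List.foldl_congr_mem _ _ _ _
    (fun s x _ => (ite_not (pvGGet maps x.1 x.2 ≠ 0) (F s x) s).symm)) ?_
  refine Eq.trans (PySem.List.foldl_ite_eq_foldl_filter _ _ _ _) ?_
  congr 1
  exact List.filter_congr (fun x _ => pv_dec0 _)

-- elements of a filtered candidate list still sit on empty cells
theorem pv_mem_filter_empty {N : Int} {maps : List (List Int)} {p : (Int × Int) → Bool} {x}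
    (hx : x ∈ ((pvCells N).filter (fun x => pvGGet maps x.1 x.2 == 0)).filter p) :
    pvGGet maps x.1 x.2 = 0 := by
  have := (List.mem_filter.1 ((List.mem_filter.1 hx).1)).2
  simpa using this

theorem pv_fold_cnt_nonneg {α : Type} (F : Int → α → Int)
    (h : ∀ a x, F a x = a ∨ F a x = a + 1) :
    ∀ (l : List α) (init : Int), 0 ≤ init → 0 ≤ l.foldl F init := by
  intro l
  induction l with
  | nil => intro init h0; simpa using h0
  | cons x t ih =>
      intro init h0
      rw [List.foldl_cons]
      rcases h init x with he | he <;> rw [he] <;> exact ih _ (by omega)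

theorem pv_cpA_nonneg (P : List (Int × Bool)) (maps : List (List Int)) (N r c : Int) :
    0 ≤ countPreferA P maps N r c := by
  refine pv_fold_cnt_nonneg _ ?_ _ 0 le_rfl
  intro a x
  dsimp only
  split_ifs <;> simp

theorem pv_czA_nonneg (maps : List (List Int)) (N r c : Int) :
    0 ≤ countZeroA maps N r c := by
  refine pv_fold_cnt_nonneg _ ?_ _ 0 le_rfl
  intro a x
  dsimp only
  split_ifs <;> simp

def pvKey (f g : (Int × Int) → Int) (x : Int × Int) : Int × Int × Int × Int :=
  (-f x, -g x, x.1, x.2)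

theorem pv_chosen (f g : (Int × Int) → Int) (L : List (Int × Int))
    (hnn : ∀ x ∈ L, 0 ≤ f x ∧ 0 ≤ g x) (hne : L ≠ []) (hpw : L.Pairwise pvRcLt) :
    ∃ h t, ((L.filter (fun x => f x == pvMaxF f L 0)).filter
        (fun x => g x == pvMaxF g (L.filter (fun x => f x == pvMaxF f L 0)) 0)) = h :: t ∧
      L.foldl (fun best x => pvMinStep best (pvKey f g x)) none = some (pvKey f g h) := by
  set L1 := L.filter (fun x => f x == pvMaxF f L 0) with hL1
  set L2 := L1.filter (fun x => g x == pvMaxF g L1 0) with hL2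
  have hfle : ∀ x ∈ L, f x ≤ pvMaxF f L 0 := (PySem.List.le_foldl_max_int L f 0).2
  have hgle : ∀ x ∈ L1, g x ≤ pvMaxF g L1 0 := (PySem.List.le_foldl_max_int L1 g 0).2
  have hL1sub : ∀ x ∈ L1, x ∈ L := fun x hx => (List.mem_filter.1 hx).1
  have hL1ne : L1 ≠ [] := by
    rcases pv_max_attained f L hne (fun x hx => (hnn x hx).1) with ⟨x, hx, hfx⟩
    intro hemp
    have : x ∈ L1 := List.mem_filter.2 ⟨hx, by simp [hfx]⟩
    rw [hemp] at this
    simp at this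
  have hL2ne : L2 ≠ [] := by
    rcases pv_max_attained g L1 hL1ne (fun x hx => (hnn x (hL1sub x hx)).2) with ⟨x, hx, hgx⟩
    intro hemp
    have : x ∈ L2 := List.mem_filter.2 ⟨hx, by simp [hgx]⟩
    rw [hemp] at this
    simp at this
  rcases hhd : L2 with _ | ⟨h, t⟩
  · exact absurd hhd hL2ne
  have hhmem2 : h ∈ L2 := by rw [hhd]; exact List.mem_cons_self
  have hhmem1 : h ∈ L1 := (List.mem_filter.1 hhmem2).1
  have hhmem : h ∈ L := hL1sub h hhmem1
  have hfh : f h = pvMaxF f L 0 := by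
    have := (List.mem_filter.1 hhmem1).2; simpa using this
  have hgh : g h = pvMaxF g L1 0 := by
    have := (List.mem_filter.1 hhmem2).2; simpa using this
  have hpw2 : L2.Pairwise pvRcLt :=
    hpw.sublist ((List.filter_sublist).trans (List.filter_sublist))
  -- h's key is minimal among all keys of L
  have hmin : ∀ x ∈ L, pvKeyLt (pvKey f g x) (pvKey f g h) = false := by
    intro x hx
    by_cases hlt : pvKeyLt (pvKey f g x) (pvKey f g h) = true
    · exfalso
      have hxf := hfle x hx
      simp only [pvKey, pvKeyLt, Bool.or_eq_true, Bool.and_eq_true, decide_eq_true_eq,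
        beq_iff_eq] at hlt
      rcases hlt with h1 | ⟨h1, h2 | ⟨h2, h3⟩⟩
      · omega
      · -- f x = f h maximal, g x > g h impossible
        have hx1 : x ∈ L1 := List.mem_filter.2 ⟨hx, by simp; omega⟩
        have := hgle x hx1
        omega
      · -- tie on both counts: x ∈ L2, so h comes first in row-major order
        have hx1 : x ∈ L1 := List.mem_filter.2 ⟨hx, by simp; omega⟩
        have hx2 : x ∈ L2 := List.mem_filter.2 ⟨hx1, by simp; omega⟩
        rw [hhd] at hx2
        rcases List.mem_cons.1 hx2 with rfl | hxt
        · rcases h3 with h3 | h3 <;> omega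
        · have := (List.pairwise_cons.1 (hhd ▸ hpw2)).1 x hxt
          rcases this with hlt' | hlt' <;> rcases h3 with h3 | h3 <;> omega
    · simpa using hlt
  refine ⟨h, t, rfl, ?_⟩
  rw [← List.foldl_map]
  rcases hmap : L.map (pvKey f g) with _ | ⟨k0, ks⟩
  · rw [List.map_eq_nil_iff] at hmap; exact absurd hmap hne
  rw [List.foldl_cons]
  have hstep0 : pvMinStep none k0 = some k0 := rfl
  rw [hstep0]
  rcases pv_runmin_go ks k0 with ⟨c, hc, hcmem, hall, hck0⟩
  rw [hc]
  -- c is minimal among all keys; key h is minimal too; so they are equal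
  have hcin : c ∈ L.map (pvKey f g) := by
    rw [hmap]
    rcases hcmem with rfl | hm
    · exact List.mem_cons_self
    · exact List.mem_cons_of_mem _ hm
  have hcminall : ∀ y ∈ L.map (pvKey f g), pvKeyLt y c = false := by
    intro y hy
    rw [hmap] at hy
    rcases List.mem_cons.1 hy with rfl | hm
    · exact hck0
    · exact hall y hm
  have hkh : pvKey f g h ∈ L.map (pvKey f g) := List.mem_map_of_mem hhmem
  by_cases hceq : c = pvKey f g h
  · rw [hceq]
  · exfalso
    rcases pv_keyLt_total hceq with hlt | hlt
    · rcases List.mem_map.1 hcin with ⟨x, hx, rfl⟩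
      rw [hmin x hx] at hlt
      simp at hlt
    · rw [hcminall _ hkh] at hlt
      simp at hlt

theorem pv_step (seats : List (Int × List (Int × Bool))) (N : Int) (maps : List (List Int))
    (board : PySem.Dict (Int × Int) Int) (i : Nat) (stud : Int)
    (hInv : pvInv N maps board i) (hi : i < (pvCells N).length) :
    pvInv N (stepA seats N maps stud) (stepB seats N board stud)
      (i + (if stud = 0 then 0 else 1)) := by
  obtain ⟨hg, Hocc, hcount⟩ := hInv
  set P : List (Int × Bool) := (PySem.Dict.get? (PySem.Dict.mk seats) stud).getD [] with hP
  set f : (Int × Int) → Int := fun x => countPreferA P maps N x.1 x.2 with hf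
  set g : (Int × Int) → Int := fun x => countZeroA maps N x.1 x.2 with hgdef
  set L : List (Int × Int) := (pvCells N).filter (fun x => pvGGet maps x.1 x.2 == 0) with hL
  have hLlen : L.length + i = (pvCells N).length := hcount
  have hLne : L ≠ [] := by
    intro hemp; rw [hemp] at hLlen; simp at hLlen; omega
  have hLsub : ∀ x ∈ L, x ∈ pvCells N := fun x hx => (List.mem_filter.1 hx).1
  have hnn : ∀ x ∈ L, 0 ≤ f x ∧ 0 ≤ g x := fun x _ =>
    ⟨pv_cpA_nonneg P maps N x.1 x.2, pv_czA_nonneg maps N x.1 x.2⟩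
  have hpwL : L.Pairwise pvRcLt := (pv_pairwise_cells N).sublist (List.filter_sublist)
  obtain ⟨h, t, hL2, hB⟩ := pv_chosen f g L hnn hLne hpwL
  have hh2 : h ∈ (L.filter (fun x => f x == pvMaxF f L 0)).filter
      (fun x => g x == pvMaxF g (L.filter (fun x => f x == pvMaxF f L 0)) 0) := by
    rw [hL2]; exact List.mem_cons_self
  have hhL : h ∈ L := (List.mem_filter.1 ((List.mem_filter.1 hh2).1)).1
  have hhcell : h ∈ pvCells N := hLsub h hhL
  have hhz : pvGGet maps h.1 h.2 = 0 := by
    have := (List.mem_filter.1 hhL).2; simpa using this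
  rcases pv_mem_cells.1 hhcell with ⟨hb1, hb2, hb3, hb4⟩
  -- A's step picks exactly the cell h
  have hA : stepA seats N maps stud = pvSetCell maps h.1 h.2 stud := by
    simp only [stepA]
    rw [pv_nested_foldl2 N (fun s row col =>
          if pvGGet maps row col ≠ 0 then s
          else
            if s.1 == countPreferA P maps N row col then (s.1, s.2 ++ [(row, col)])
            else if s.1 < countPreferA P maps N row col then (countPreferA P maps N row col, [(row, col)])
            else s) ((0 : Int), ([] : List (Int × Int)))]
    rw [pv_guard_fold N maps (fun s x =>
          if s.1 == countPreferA P maps N x.1 x.2 then (s.1, s.2 ++ [x])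
          else if s.1 < countPreferA P maps N x.1 x.2 then (countPreferA P maps N x.1 x.2, [x])
          else s) ((0 : Int), ([] : List (Int × Int)))]
    rw [show (List.foldl (fun s x =>
          if s.1 == countPreferA P maps N x.1 x.2 then (s.1, s.2 ++ [x])
          else if s.1 < countPreferA P maps N x.1 x.2 then (countPreferA P maps N x.1 x.2, [x])
          else s) ((0 : Int), ([] : List (Int × Int))) L)
        = (pvMaxF f L 0, (if pvMaxF f L 0 = 0 then [] else []) ++
            L.filter (fun x => f x == pvMaxF f L 0)) from pv_sel_go f L 0 []]
    rw [ite_self, List.nil_append]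
    rw [PySem.List.foldl_congr_mem (L.filter (fun x => f x == pvMaxF f L 0)) _ (pvSelStep g)
      ((0 : Int), ([] : List (Int × Int))) (fun acc x hx => by
        rw [if_neg (by rw [pv_mem_filter_empty hx]; simp)]; rfl)]
    rw [pv_sel_go g (L.filter (fun x => f x == pvMaxF f L 0)) 0 []]
    rw [ite_self, List.nil_append, hL2]
    rw [PySem.List.pop?_zero_cons]
    rfl
  -- B's step inserts exactly the cell h
  have hBstep : stepB seats N board stud = PySem.Dict.insert board (h.1, h.2) stud := by
    simp only [stepB]
    rw [pv_nested_foldl2 N (fun best row col =>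
          if PySem.Dict.getD board (row, col) 0 ≠ 0 then best
          else pvMinStep best (-(pvPE P board N row col).1, -(pvPE P board N row col).2, row, col))
        (none : Option (Int × Int × Int × Int))]
    rw [PySem.List.foldl_congr_mem (pvCells N) _
        (fun best x => if pvGGet maps x.1 x.2 ≠ 0 then best else pvMinStep best (pvKey f g x))
        (none : Option (Int × Int × Int × Int)) (fun acc x hx => by
          dsimp only
          rcases pv_mem_cells.1 hx with ⟨b1, b2, b3, b4⟩
          rw [Hocc _ _ b1 b2 b3 b4, pv_pe_eq P maps board N Hocc x.1 x.2]
          rfl)]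
    rw [pv_guard_fold N maps (fun best x => pvMinStep best (pvKey f g x))
        (none : Option (Int × Int × Int × Int))]
    rw [hB]
    rfl
  rw [hA, hBstep]
  -- re-establish the invariant
  have hgset : ∀ a b, 0 ≤ a → a < N → 0 ≤ b → b < N →
      pvGGet (pvSetCell maps h.1 h.2 stud) a b
        = if a = h.1 ∧ b = h.2 then stud else pvGGet maps a b :=
    fun a b h1 h2 h3 h4 => pv_gget_set hg stud hb1 hb2 hb3 hb4 h1 h2 h3 h4
  refine ⟨pv_grid_set hg stud hb1 hb2 hb3, ?_, ?_⟩
  · intro a b h1 h2 h3 h4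
    rw [PySem.Dict.getD_insert, hgset a b h1 h2 h3 h4]
    by_cases he : a = h.1 ∧ b = h.2
    · rw [if_pos he, if_pos (by rcases he with ⟨he1, he2⟩; subst he1; subst he2; rfl)]
    · rw [if_neg he, if_neg (by intro hc; exact he (by rw [Prod.ext_iff] at hc; exact ⟨hc.1, hc.2⟩)),
        Hocc _ _ h1 h2 h3 h4]
  · by_cases hz : stud = 0
    · -- a student id 0 re-marks its seat empty: the set of empty cells is unchanged
      have hfe : (pvCells N).filter (fun x => pvGGet (pvSetCell maps h.1 h.2 stud) x.1 x.2 == 0)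
          = L := by
        rw [hL]
        refine List.filter_congr (fun x hx => ?_)
        rcases pv_mem_cells.1 hx with ⟨b1, b2, b3, b4⟩
        rw [hgset x.1 x.2 b1 b2 b3 b4]
        by_cases he : x.1 = h.1 ∧ x.2 = h.2
        · rw [if_pos he, hz]
          have : x = h := by rw [Prod.ext_iff]; exact ⟨he.1, he.2⟩
          rw [this, hhz]
        · rw [if_neg he]
      rw [hfe, if_pos hz]
      omega
    · have hfe : (pvCells N).filter (fun x => pvGGet (pvSetCell maps h.1 h.2 stud) x.1 x.2 == 0)
          = L.filter (fun x => x != h) := by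
        rw [hL, List.filter_filter]
        refine List.filter_congr (fun x hx => ?_)
        rcases pv_mem_cells.1 hx with ⟨b1, b2, b3, b4⟩
        rw [hgset x.1 x.2 b1 b2 b3 b4]
        by_cases he : x.1 = h.1 ∧ x.2 = h.2
        · rw [if_pos he]
          have : (x != h) = false := by
            have hxeq : x = h := by rw [Prod.ext_iff]; exact ⟨he.1, he.2⟩
            simp [hxeq]
          rw [this]
          simp [hz]
        · rw [if_neg he]
          have : (x != h) = true := by
            simp only [bne_iff_ne, ne_eq]
            intro hc; exact he (by rw [hc]; exact ⟨rfl, rfl⟩)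
          rw [this]
          simp
      rw [hfe, if_neg hz]
      have hnd : L.Nodup := (pv_nodup_cells N).filter _
      have : L.filter (fun x => x != h) = L.erase h := (hnd.erase_eq_filter h).symm
      rw [this, List.length_erase_of_mem hhL]
      have : 0 < L.length := List.length_pos_of_mem hhL
      omega

-- ----- the satisfaction scans -----

def pvScanA (seats : List (Int × List (Int × Bool))) (N : Int) (maps : List (List Int)) : Int :=
  (PySem.List.pyRange 0 N 1).foldl (fun satisfy row =>
    (PySem.List.pyRange 0 N 1).foldl (fun satisfy col =>
      let student := pvGGet maps row col
      let prefer := (PySem.Dict.get? (PySem.Dict.mk seats) student).getD []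
      let cnt := countPreferA prefer maps N row col
      let satisfy := if cnt == 1 then satisfy + 1 else satisfy
      let satisfy := if cnt == 2 then satisfy + 10 else satisfy
      let satisfy := if cnt == 3 then satisfy + 100 else satisfy
      if cnt == 4 then satisfy + 1000 else satisfy) satisfy) 0

def pvScanB (seats : List (Int × List (Int × Bool))) (N : Int)
    (board : PySem.Dict (Int × Int) Int) : Int :=
  (PySem.List.pyRange 0 N 1).foldl (fun satisfy row =>
    (PySem.List.pyRange 0 N 1).foldl (fun satisfy col =>
      let prefer := (PySem.Dict.get? (PySem.Dict.mk seats)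
        (PySem.Dict.getD board (row, col) 0)).getD []
      let p := countPreferB prefer board N row col
      satisfy + PySem.Dict.getD (PySem.Dict.mk pvSCORE) p 0) satisfy) 0

theorem pv_cpB_eq (prefer : List (Int × Bool)) (maps : List (List Int))
    (board : PySem.Dict (Int × Int) Int) (N : Int)
    (Hocc : ∀ a b, 0 ≤ a → a < N → 0 ≤ b → b < N →
      PySem.Dict.getD board (a, b) 0 = pvGGet maps a b) (r c : Int) :
    countPreferB prefer board N r c = countPreferA prefer maps N r c := by
  have hzip : pvDR.zip pvDC = pvNBRS := rfl
  rw [countPreferB, countPreferA, hzip]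
  refine PySem.List.foldl_congr_mem _ _ _ _ (fun acc d _ => ?_)
  dsimp only
  rw [pv_bound_eq]
  by_cases hC : 0 ≤ r + d.1 ∧ r + d.1 < N ∧ 0 ≤ c + d.2 ∧ c + d.2 < N
  · rw [if_pos hC, if_pos (decide_eq_true hC), Hocc _ _ hC.1 hC.2.1 hC.2.2.1 hC.2.2.2]
  · rw [if_neg hC, if_neg (by rw [decide_eq_false hC]; simp)]

theorem pv_score_eval (cnt : Int) :
    PySem.Dict.getD (PySem.Dict.mk pvSCORE) cnt 0
      = if cnt = 1 then 1 else if cnt = 2 then 10 else if cnt = 3 then 100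
        else if cnt = 4 then 1000 else 0 := by
  have hbase : (PySem.Dict.mk ([] : List (Int × Int))).get? cnt = none := rfl
  rw [PySem.Dict.getD_eq_get?_getD]
  simp only [pvSCORE, PySem.Dict.get?_mk_cons, hbase]
  split_ifs <;> simp_all

theorem pv_scan_eq (seats : List (Int × List (Int × Bool))) (N : Int) (maps : List (List Int))
    (board : PySem.Dict (Int × Int) Int)
    (Hocc : ∀ a b, 0 ≤ a → a < N → 0 ≤ b → b < N →
      PySem.Dict.getD board (a, b) 0 = pvGGet maps a b) :
    pvScanA seats N maps = pvScanB seats N board := by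
  unfold pvScanA pvScanB
  rw [pv_nested_foldl2 N (fun satisfy row col =>
      let student := pvGGet maps row col
      let prefer := (PySem.Dict.get? (PySem.Dict.mk seats) student).getD []
      let cnt := countPreferA prefer maps N row col
      let satisfy := if cnt == 1 then satisfy + 1 else satisfy
      let satisfy := if cnt == 2 then satisfy + 10 else satisfy
      let satisfy := if cnt == 3 then satisfy + 100 else satisfy
      if cnt == 4 then satisfy + 1000 else satisfy) 0]
  rw [pv_nested_foldl2 N (fun satisfy row col =>
      let prefer := (PySem.Dict.get? (PySem.Dict.mk seats)
        (PySem.Dict.getD board (row, col) 0)).getD []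
      let p := countPreferB prefer board N row col
      satisfy + PySem.Dict.getD (PySem.Dict.mk pvSCORE) p 0) 0]
  refine PySem.List.foldl_congr_mem _ _ _ _ (fun sat x hx => ?_)
  rcases pv_mem_cells.1 hx with ⟨b1, b2, b3, b4⟩
  dsimp only
  rw [Hocc x.1 x.2 b1 b2 b3 b4]
  rw [pv_cpB_eq ((PySem.Dict.get? (PySem.Dict.mk seats) (pvGGet maps x.1 x.2)).getD [])
    maps board N Hocc x.1 x.2]
  rw [pv_score_eval]
  set cnt := countPreferA ((PySem.Dict.get? (PySem.Dict.mk seats) (pvGGet maps x.1 x.2)).getD [])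
    maps N x.1 x.2 with hcnt
  by_cases h1 : cnt = 1 <;> by_cases h2 : cnt = 2 <;> by_cases h3 : cnt = 3 <;>
    by_cases h4 : cnt = 4 <;> simp [h1, h2, h3, h4]

-- ----- the placement loop -----

theorem pv_loop (seats : List (Int × List (Int × Bool))) (N : Int) :
    ∀ (sl : List Int) (maps : List (List Int)) (board : PySem.Dict (Int × Int) Int) (i : Nat),
    pvInv N maps board i →
    (sl ≠ [] → i + sl.dropLast.countP (fun s => s != 0) < (pvCells N).length) →
    pvInv N (sl.foldl (stepA seats N) maps) (sl.foldl (stepB seats N) board)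
      (i + sl.countP (fun s => s != 0)) := by
  intro sl
  induction sl with
  | nil => intro maps board i hInv _; simpa using hInv
  | cons stud t ih =>
      intro maps board i hInv hbound
      rw [List.foldl_cons, List.foldl_cons]
      have hi : i < (pvCells N).length :=
        lt_of_le_of_lt (Nat.le_add_right _ _) (hbound (by simp))
      have hstep := pv_step seats N maps board i stud hInv hi
      have hrec := ih (stepA seats N maps stud) (stepB seats N board stud)
        (i + (if stud = 0 then 0 else 1)) hstep (fun htne => by
          have hb := hbound (by simp)
          rcases t with _ | ⟨y, ys⟩
          · exact absurd rfl htne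
          · simp only [List.dropLast_cons₂, List.countP_cons] at hb ⊢
            by_cases hz : stud = 0 <;> simp [hz] at hb ⊢ <;> omega)
      have harith : i + (if stud = 0 then 0 else 1) + t.countP (fun s => s != 0)
          = i + (stud :: t).countP (fun s => s != 0) := by
        by_cases hz : stud = 0
        · simp [hz]
        · simp [hz]
          omega
      exact harith ▸ hrec

-- ===== VERDICT (by name: the statement is the Claim_ definition above) =====
theorem solution_spec : Claim_equal_solution := by
  unfold Claim_equal_solution
  intro seats N sl hdom hpre
  unfold Spec_solution
  obtain ⟨hkeys, hbound, h0key⟩ := hpre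
  have hInv := pv_loop seats N sl (make_maps N) PySem.Dict.empty 0 (pv_inv_init N)
    (fun hne => by rw [pv_length_cells]; simpa using hbound hne)
  obtain ⟨hgF, HoccF, _⟩ := hInv
  have hA : solution seats N sl = pvScanA seats N (sl.foldl (stepA seats N) (make_maps N)) := rfl
  have hB : solution_alt seats N sl
      = pvScanB seats N (sl.foldl (stepB seats N) PySem.Dict.empty) := rfl
  rw [hA, hB, pv_scan_eq seats N _ _ HoccF]
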